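-- pv_equiv track=rewrite | github.com/agatabaczkiewicz/SK2Hangman | main.py | sort_players
-- ===== SOURCE A (Python) =====
-- def sort_players(tab):
--     tab_full_hang = []
--     tab_winners = []
--     for i in range(len(tab)):
--         if tab[i][1]==6:
--             tab_full_hang.append(tab[i])
--         else:
--             tab_winners.append(tab[i])
--     tab_winners = sorted(tab_winners,key=lambda x: x[1], reverse=True)
--     tab_full_hangsorted = sorted(tab_full_hang,key=lambda x: x[1], reverse=True)
--
--     return tab_winners + tab_full_hang
-- ===== SOURCE B (Python) =====
-- def sort_players(tab):
--     # One stable sort: value-6 players go last (in original order), the rest descending by score.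
--     return sorted(tab, key=lambda x: (x[1] == 6, -x[1]))
-- ===== Notes on version B (the rewrite author's own statement) =====
-- stated objective: simpler
-- what changed: Replaces the explicit partition loop plus a separate reverse sort (and a dead sort of the full-hang group) with a single stable sort over the whole list using the composite key (score==6, -score).
import Mathlib
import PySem

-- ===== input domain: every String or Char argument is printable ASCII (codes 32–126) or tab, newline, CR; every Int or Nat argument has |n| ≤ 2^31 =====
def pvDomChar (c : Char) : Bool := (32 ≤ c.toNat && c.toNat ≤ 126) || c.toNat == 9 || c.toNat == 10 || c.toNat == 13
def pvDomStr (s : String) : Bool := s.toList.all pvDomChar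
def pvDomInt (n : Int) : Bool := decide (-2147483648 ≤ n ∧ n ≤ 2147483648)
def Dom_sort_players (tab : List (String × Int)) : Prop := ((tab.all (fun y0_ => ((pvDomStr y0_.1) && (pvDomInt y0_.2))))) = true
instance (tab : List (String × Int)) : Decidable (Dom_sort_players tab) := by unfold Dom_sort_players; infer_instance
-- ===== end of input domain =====

-- B replaces A's partition loop + separate reverse sort (plus a dead sort) with one stable
-- composite-key sort; objective: simpler.


-- ===== PORT A =====
-- literal port: index loop partitioning into (tab_full_hang, tab_winners), then a reverse
-- sort of the winners; the sorted full-hang list is computed and discarded, as in A.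
def sort_players (tab : List (String × Int)) : List (String × Int) :=
  let p := (PySem.List.pyRange 0 (PySem.List.len tab)).foldl
    (fun (acc : List (String × Int) × List (String × Int)) i =>
      if (PySem.List.pyGetD tab i ("", 0)).2 == 6 then
        (acc.1 ++ [PySem.List.pyGetD tab i ("", 0)], acc.2)
      else
        (acc.1, acc.2 ++ [PySem.List.pyGetD tab i ("", 0)]))
    ([], [])
  let tab_winners := PySem.List.sorted p.2 (fun x => x.2) true
  let _tab_full_hangsorted := PySem.List.sorted p.1 (fun x => x.2) true
  tab_winners ++ p.1

-- ===== PORT B =====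
-- sorted(tab, key=lambda x: (x[1] == 6, -x[1]))
def sort_players_alt (tab : List (String × Int)) : List (String × Int) :=
  PySem.List.sorted2 tab (fun x => decide (x.2 = 6)) (fun x => -x.2) false

-- ===== PRECONDITION & SPEC =====
def Spec_sort_players (tab : List (String × Int)) (out : List (String × Int)) : Prop := out = sort_players_alt tab
instance (tab : List (String × Int)) (out : List (String × Int)) : Decidable (Spec_sort_players tab out) := by unfold Spec_sort_players; infer_instance

-- ===== CLAIM (what is proved, stated in full; the proofs are below) =====
def Claim_equal_sort_players : Prop := ∀ (tab : List (String × Int)), Dom_sort_players tab → Spec_sort_players tab (sort_players tab)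

-- ===== LEMMAS AND PROOFS =====

-- B's composite insertion predicate (the `before` of sorted2 with reverse = false)
def pvLt2 (a b : String × Int) : Bool :=
  decide ((decide (a.2 = 6) : Bool) < decide (b.2 = 6)) ||
    (!decide ((decide (b.2 = 6) : Bool) < decide (a.2 = 6)) && decide (-a.2 < -b.2))

-- A's reverse-by-score insertion predicate (the `before` of sorted … true)
def pvLtW (a b : String × Int) : Bool := decide (b.2 < a.2)

theorem pvAlt_eq_foldl (tab : List (String × Int)) :
    sort_players_alt tab = tab.foldl (fun acc x => PySem.List.insertBy pvLt2 x acc) [] := rfl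

-- A's partition loop, as filters.
theorem pvPartition (tab : List (String × Int)) :
    ∀ (h w : List (String × Int)),
      tab.foldl
        (fun (acc : List (String × Int) × List (String × Int)) x =>
          if x.2 == 6 then (acc.1 ++ [x], acc.2) else (acc.1, acc.2 ++ [x]))
        (h, w)
      = (h ++ tab.filter (fun x => x.2 == 6), w ++ tab.filter (fun x => !(x.2 == 6))) := by
  induction tab with
  | nil => simp
  | cons x t ih =>
    intro h w
    simp only [List.foldl_cons]
    by_cases hx : x.2 = 6
    · rw [if_pos (by simp [hx] : (x.2 == 6) = true), ih]
      simp [hx]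
    · rw [if_neg (by simp [hx])]
      rw [ih]
      simp [hx]

-- inserting into w ++ h when x is never placed before an element of w per before₁ = before₂,
-- and always before an element of h.
theorem pvInsert_append (x : String × Int) (b1 b2 : (String × Int) → (String × Int) → Bool)
    (h : List (String × Int)) (hh : ∀ e ∈ h, b1 x e = true) :
    ∀ w : List (String × Int), (∀ e ∈ w, b1 x e = b2 x e) →
      PySem.List.insertBy b1 x (w ++ h) = PySem.List.insertBy b2 x w ++ h := by
  intro w
  induction w with
  | nil =>
    intro _
    cases h with
    | nil => simp [PySem.List.insertBy]
    | cons e t => simp [PySem.List.insertBy, hh e (by simp)]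
  | cons e w' ih =>
    intro hw
    have he : b1 x e = b2 x e := hw e (by simp)
    by_cases hb : b2 x e = true
    · simp [PySem.List.insertBy, he, hb]
    · simp only [Bool.not_eq_true] at hb
      simp [PySem.List.insertBy, he, hb, ih (fun e' he' => hw e' (by simp [he']))]

-- main invariant: B's single composite-key insertion pass over tab, started from w ++ h
-- (w the non-6 part so far, h the 6 part so far), equals A's reverse insertion pass over
-- the non-6 elements of tab started from w, followed by h and the 6 elements of tab.
theorem pvMain (tab : List (String × Int)) :
    ∀ (w h : List (String × Int)), (∀ e ∈ w, e.2 ≠ 6) → (∀ e ∈ h, e.2 = 6) →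
      tab.foldl (fun acc x => PySem.List.insertBy pvLt2 x acc) (w ++ h)
      = (tab.filter (fun x => !(x.2 == 6))).foldl
          (fun acc x => PySem.List.insertBy pvLtW x acc) w
        ++ (h ++ tab.filter (fun x => x.2 == 6)) := by
  induction tab with
  | nil => intro w h _ _; simp
  | cons x t ih =>
    intro w h hw hh
    by_cases hx : x.2 = 6
    · have hstep : PySem.List.insertBy pvLt2 x (w ++ h) = (w ++ h) ++ [x] := by
        apply PySem.List.insertBy_of_forall_not_before
        intro y hy
        rcases List.mem_append.mp hy with hyw | hyh
        · have hy6 : y.2 ≠ 6 := hw y hyw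
          simp [pvLt2, hx, hy6]
        · have hy6 : y.2 = 6 := hh y hyh
          simp [pvLt2, hx, hy6]
      simp only [List.foldl_cons, hstep, List.append_assoc]
      rw [ih w (h ++ [x]) hw (by intro e he; rcases List.mem_append.mp he with h1 | h1
                                 · exact hh e h1
                                 · simp at h1; simp [h1, hx])]
      simp [hx]
    · have hstep : PySem.List.insertBy pvLt2 x (w ++ h)
          = PySem.List.insertBy pvLtW x w ++ h := by
        apply pvInsert_append
        · intro e he
          have he6 : e.2 = 6 := hh e he
          simp [pvLt2, hx, he6]
        · intro e he
          have he6 : e.2 ≠ 6 := hw e he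
          simp [pvLt2, pvLtW, hx, he6]
      simp only [List.foldl_cons, hstep]
      rw [ih (PySem.List.insertBy pvLtW x w) h
            (by intro e he
                rcases (PySem.List.mem_insertBy pvLtW x e w).mp he with h1 | h1
                · simp [h1, hx]
                · exact hw e h1) hh]
      simp [hx]

-- ===== VERDICT (by name: the statement is the Claim_ definition above) =====
theorem sort_players_spec : Claim_equal_sort_players := by
  intro tab _
  unfold Spec_sort_players sort_players
  rw [PySem.List.foldl_pyRange_zero_pyGetD tab ("", 0)
       (fun (acc : List (String × Int) × List (String × Int)) x =>
          if x.2 == 6 then (acc.1 ++ [x], acc.2) else (acc.1, acc.2 ++ [x])) ([], [])]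
  rw [pvPartition tab [] []]
  simp only [List.nil_append]
  rw [pvAlt_eq_foldl, PySem.List.sorted_rev_eq_foldl_insertBy]
  have := pvMain tab [] [] (by simp) (by simp)
  simp only [List.append_nil, List.nil_append] at this
  rw [this]
  rfl
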